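-- pv_equiv track=rewrite | github.com/sumukshashidhar/yourbench | yourbench/utils/dataset_engine.py | _unrank_comb
-- ===== SOURCE A (Python) =====
-- import math
-- from typing import TYPE_CHECKING, Any, Set, List, Union, TypeVar, Sequence
--
-- def _unrank_comb(n: int, k: int, rank: int) -> List[int]:
--     """
--     Return the k-combination of [0, n) corresponding to the given rank
--     in colexicographic (colex) order.
--
--     Colexicographic order sorts combinations by increasing values of the
--     largest element, then second largest, and so on (i.e., right-to-left
--     significance).
--
--     Parameters
--     ----------
--     n : int
--         Size of the universe (exclusive upper bound of elements).
--     k : int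
--         Size of each combination.
--     rank : int
--         Integer in the range [0, C(n, k)) specifying the position of the combination
--         in colexicographic order.
--
--     Returns
--     -------
--     List[int]
--         A strictly increasing list of k integers in the range [0, n),
--         representing the rank-th combination in colex order.
--
--     Raises
--     ------
--     ValueError
--         If k is not in [0, n] or rank is not in [0, C(n, k)).
--     """
--     if not 0 <= k <= n:
--         raise ValueError(f"require 0 ≤ k ≤ n, got k={k}, n={n}")
--     max_rank = math.comb(n, k)
--     if not 0 <= rank < max_rank:
--         raise ValueError(f"rank must be in [0,{max_rank - 1}], got {rank}")
--
--     combo: List[int] = []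
--     for i in range(k, 0, -1):
--         # largest c such that C(c, i) ≤ rank (binary search)
--         lo, hi = i - 1, n - 1
--         while lo < hi:
--             mid = (lo + hi + 1) // 2
--             if math.comb(mid, i) <= rank:
--                 lo = mid
--             else:
--                 hi = mid - 1
--         combo.append(lo)
--         rank -= math.comb(lo, i)
--         n = lo  # next digit must be < current one
--     combo.reverse()
--     return combo
-- ===== SOURCE B (Python) =====
-- import math
-- from typing import List
--
--
-- def _unrank_comb(n: int, k: int, rank: int) -> List[int]:
--     """Unrank a k-combination in colex order: greedy linear scan with an
--     incremental binomial recurrence instead of a per-digit binary search."""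
--     if not 0 <= k <= n:
--         raise ValueError(f"require 0 \u2264 k \u2264 n, got k={k}, n={n}")
--     max_rank = math.comb(n, k)
--     if not 0 <= rank < max_rank:
--         raise ValueError(f"rank must be in [0,{max_rank - 1}], got {rank}")
--
--     combo: List[int] = []
--     for i in range(k, 0, -1):
--         # b = C(c, i), t = C(c + 1, i); advance c while C(c + 1, i) <= rank
--         c, b, t = i - 1, 0, 1
--         for _ in range(i, n):
--             if t > rank:
--                 break
--             c += 1
--             b, t = t, t * (c + 1) // (c + 1 - i)
--         combo = [c] + combo
--         rank -= b
--         n = c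
--     return combo
-- ===== Notes on version B (the rewrite author's own statement) =====
-- stated objective: alternative
-- what changed: Replaces A's per-digit binary search (calling math.comb at every probe) with a greedy linear scan that maintains the binomial coefficient incrementally via the exact recurrence C(c+1,i)=C(c,i)*(c+1)//(c+1-i), and builds the result front-to-back instead of appending and reversing.
import Mathlib
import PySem

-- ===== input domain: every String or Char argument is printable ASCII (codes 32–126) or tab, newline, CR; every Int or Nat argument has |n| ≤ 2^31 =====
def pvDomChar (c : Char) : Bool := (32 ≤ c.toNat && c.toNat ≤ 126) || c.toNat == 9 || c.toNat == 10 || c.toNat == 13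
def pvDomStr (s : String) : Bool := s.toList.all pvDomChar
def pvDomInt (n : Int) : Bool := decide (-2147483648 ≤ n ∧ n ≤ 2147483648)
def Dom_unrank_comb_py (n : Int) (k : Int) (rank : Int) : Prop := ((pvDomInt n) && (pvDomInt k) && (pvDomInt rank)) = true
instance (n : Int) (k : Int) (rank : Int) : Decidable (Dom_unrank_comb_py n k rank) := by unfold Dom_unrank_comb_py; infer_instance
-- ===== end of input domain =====

-- B replaces A's per-digit binary search by a greedy linear scan with an incremental
-- binomial recurrence and builds the result front-to-back (no final reverse): an
-- alternative algorithm, not claimed faster.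
-- Both Pythons raise ValueError outside Pre_; the ports return [] there (unclaimed).

-- ===== PORT A =====
-- port of math.comb (CPython's exact multiplicative algorithm): C(a,j+1) = C(a,j)*(a-j)/(j+1)
def pyCombNat (a : Nat) (b : Nat) : Nat :=
  if a < b then 0
  else (List.range b).foldl (fun acc j => acc * (a - j) / (j + 1)) 1

def pyComb (a : Int) (b : Int) : Int := (pyCombNat a.toNat b.toNat : Int)

-- the `while lo < hi` binary search of A
def bsearchA (i : Int) (rank : Int) (lo : Int) (hi : Int) : Int :=
  if _h : lo < hi then
    let mid := PySem.Int.floordiv (lo + hi + 1) 2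
    if pyComb mid i ≤ rank then bsearchA i rank mid hi
    else bsearchA i rank lo (mid - 1)
  else lo
termination_by (hi - lo).toNat
decreasing_by
  all_goals
    have h1 : lo + 1 ≤ PySem.Int.floordiv (lo + hi + 1) 2 := by
      rw [PySem.Int.le_floordiv_iff_mul_le (by omega)]; omega
    have h2 : PySem.Int.floordiv (lo + hi + 1) 2 ≤ hi := by
      have := (PySem.Int.floordiv_lt_iff_lt_mul (a := lo + hi + 1) (b := 2) (q := hi + 1) (by omega)).mpr (by omega)
      omega
    omega

-- the `for i in range(k, 0, -1)` loop of A; fuel = current i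
def loopA (fuel : Nat) (n : Int) (rank : Int) (combo : List Int) : List Int :=
  match fuel with
  | 0 => combo
  | m + 1 =>
    let i : Int := (m : Int) + 1
    let lo := bsearchA i rank (i - 1) (n - 1)
    loopA m lo (rank - pyComb lo i) (combo ++ [lo])

def unrank_comb_py (n : Int) (k : Int) (rank : Int) : List Int :=
  if ¬ (0 ≤ k ∧ k ≤ n) then []          -- Python raises ValueError; outside Pre_
  else
    let max_rank := pyComb n k
    if ¬ (0 ≤ rank ∧ rank < max_rank) then []   -- Python raises ValueError; outside Pre_
    else (loopA k.toNat n rank []).reverse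

-- ===== PORT B =====
-- greedy scan: b = C(c,i), t = C(c+1,i); advance c while t ≤ rank, at most `steps` times
def scanB (i : Int) (rank : Int) (c : Int) (b : Int) (t : Int) (steps : Nat) : Int × Int :=
  match steps with
  | 0 => (c, b)
  | s + 1 =>
    if t ≤ rank then
      scanB i rank (c + 1) t (PySem.Int.floordiv (t * (c + 2)) (c + 2 - i)) s
    else (c, b)

def loopB (fuel : Nat) (n : Int) (rank : Int) (combo : List Int) : List Int :=
  match fuel with
  | 0 => combo
  | m + 1 =>
    let i : Int := (m : Int) + 1
    let p := scanB i rank (i - 1) 0 1 (n - i).toNat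
    loopB m p.1 (rank - p.2) (p.1 :: combo)

def unrank_comb_py_alt (n : Int) (k : Int) (rank : Int) : List Int :=
  if ¬ (0 ≤ k ∧ k ≤ n) then []          -- Python raises ValueError; outside Pre_
  else if ¬ (0 ≤ rank ∧ rank < pyComb n k) then []   -- Python raises ValueError; outside Pre_
  else loopB k.toNat n rank []

-- ===== PRECONDITION & SPEC =====
-- Pre_ = exactly the inputs on which A returns (both Pythons raise ValueError otherwise)
def Pre_unrank_comb_py (n : Int) (k : Int) (rank : Int) : Prop :=
  0 ≤ k ∧ k ≤ n ∧ 0 ≤ rank ∧ rank < pyComb n k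
instance (n : Int) (k : Int) (rank : Int) : Decidable (Pre_unrank_comb_py n k rank) := by
  unfold Pre_unrank_comb_py; infer_instance

def pvWitness_unrank_comb_py : Int × Int × Int := (5, 3, 7)

def Spec_unrank_comb_py (n : Int) (k : Int) (rank : Int) (out : List Int) : Prop := out = unrank_comb_py_alt n k rank
instance (n : Int) (k : Int) (rank : Int) (out : List Int) : Decidable (Spec_unrank_comb_py n k rank out) := by unfold Spec_unrank_comb_py; infer_instance

-- ===== CLAIM (what is proved, stated in full; the proofs are below) =====
def Claim_equal_unrank_comb_py : Prop := ∀ (n : Int) (k : Int) (rank : Int), Dom_unrank_comb_py n k rank → Pre_unrank_comb_py n k rank → Spec_unrank_comb_py n k rank (unrank_comb_py n k rank)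

-- ===== LEMMAS AND PROOFS =====

-- pyCombNat is the binomial coefficient
theorem pyCombNat_range (a : Nat) : ∀ b : Nat, b ≤ a →
    (List.range b).foldl (fun acc j => acc * (a - j) / (j + 1)) 1 = a.choose b := by
  intro b
  induction b with
  | zero => simp
  | succ m ih =>
    intro h
    rw [List.range_succ, List.foldl_append, ih (by omega)]
    simp only [List.foldl_cons, List.foldl_nil]
    have key : a.choose (m + 1) * (m + 1) = a.choose m * (a - m) := Nat.choose_succ_right_eq a m
    rw [← key, Nat.mul_div_cancel _ (by omega)]

theorem pyCombNat_eq_choose (a b : Nat) : pyCombNat a b = a.choose b := by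
  unfold pyCombNat
  split
  · exact (Nat.choose_eq_zero_of_lt (by omega)).symm
  · exact pyCombNat_range a b (by omega)

theorem pyComb_eq (a b : Int) : pyComb a b = (a.toNat.choose b.toNat : Int) := by
  simp [pyComb, pyCombNat_eq_choose]

-- monotonicity of pyComb in its first argument
theorem pyComb_mono {i a b : Int} (hab : a ≤ b) : pyComb a i ≤ pyComb b i := by
  rw [pyComb_eq, pyComb_eq]
  exact_mod_cast Nat.choose_le_choose i.toNat (by omega)

theorem pyComb_below (i : Int) (h1 : 1 ≤ i) : pyComb (i - 1) i = 0 := by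
  rw [pyComb_eq, Nat.choose_eq_zero_of_lt (show (i - 1).toNat < i.toNat by omega)]
  rfl

theorem pyComb_self (i : Int) (_h1 : 0 ≤ i) : pyComb i i = 1 := by
  rw [pyComb_eq, Nat.choose_self]; rfl

-- the characterisation both searches satisfy: greatest c in [lo, top] with C(c,i) ≤ rank
def IsHit (i rank lo top c : Int) : Prop :=
  lo ≤ c ∧ c ≤ top ∧ pyComb c i ≤ rank ∧ (c = top ∨ rank < pyComb (c + 1) i)

theorem isHit_unique {i rank lo top c d : Int} (hc : IsHit i rank lo top c)
    (hd : IsHit i rank lo top d) : c = d := by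
  obtain ⟨hc1, hc2, hc3, hc4⟩ := hc
  obtain ⟨hd1, hd2, hd3, hd4⟩ := hd
  by_contra hne
  rcases lt_or_gt_of_ne hne with h | h
  · rcases hc4 with h4 | h4
    · omega
    · exact absurd (le_trans (pyComb_mono (by omega : c + 1 ≤ d)) hd3) (by omega)
  · rcases hd4 with h4 | h4
    · omega
    · exact absurd (le_trans (pyComb_mono (by omega : d + 1 ≤ c)) hc3) (by omega)

theorem bsearchA_isHit (i rank : Int) : ∀ m : Nat, ∀ lo hi : Int, (hi - lo).toNat = m →
    lo ≤ hi → pyComb lo i ≤ rank → IsHit i rank lo hi (bsearchA i rank lo hi) := by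
  intro m
  induction m using Nat.strong_induction_on with
  | _ m ih =>
    intro lo hi hm hle hlo
    rw [bsearchA]
    by_cases h : lo < hi
    · simp only [h, dif_pos]
      set mid := PySem.Int.floordiv (lo + hi + 1) 2 with hmid
      have h1 : lo + 1 ≤ mid := by
        rw [hmid, PySem.Int.le_floordiv_iff_mul_le (by omega)]; omega
      have h2 : mid ≤ hi := by
        have := (PySem.Int.floordiv_lt_iff_lt_mul (a := lo + hi + 1) (b := 2) (q := hi + 1) (by omega)).mpr (by omega)
        omega
      by_cases hc : pyComb mid i ≤ rank
      · simp only [hc, if_pos]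
        obtain ⟨a1, a2, a3, a4⟩ := ih (hi - mid).toNat (by omega) mid hi rfl (by omega) hc
        exact ⟨by omega, a2, a3, a4⟩
      · simp only [hc, if_neg, not_false_iff]
        obtain ⟨a1, a2, a3, a4⟩ := ih (mid - 1 - lo).toNat (by omega) lo (mid - 1) rfl (by omega) hlo
        refine ⟨a1, by omega, a3, ?_⟩
        rcases a4 with h4 | h4
        · right
          have : bsearchA i rank lo (mid - 1) + 1 = mid := by omega
          rw [this]; omega
        · right; exact h4
    · simp only [h, dif_neg, not_false_iff]
      exact ⟨le_refl _, by omega, hlo, Or.inl (by omega)⟩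

theorem scanB_spec (i rank : Int) (hi1 : 1 ≤ i) : ∀ steps : Nat, ∀ c : Int,
    i - 1 ≤ c → pyComb c i ≤ rank →
    IsHit i rank c (c + steps) (scanB i rank c (pyComb c i) (pyComb (c + 1) i) steps).1 ∧
    (scanB i rank c (pyComb c i) (pyComb (c + 1) i) steps).2 =
      pyComb (scanB i rank c (pyComb c i) (pyComb (c + 1) i) steps).1 i := by
  intro steps
  induction steps with
  | zero =>
    intro c hc hcr
    rw [scanB]
    exact ⟨⟨le_refl _, by omega, hcr, Or.inl (by push_cast; omega)⟩, rfl⟩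
  | succ s ih =>
    intro c hc hcr
    rw [scanB]
    by_cases ht : pyComb (c + 1) i ≤ rank
    · simp only [ht, if_pos]
      have hpos : (0 : Int) < c + 2 - i := by omega
      have hrec : PySem.Int.floordiv (pyComb (c + 1) i * (c + 2)) (c + 2 - i) = pyComb (c + 2) i := by
        have key := Nat.choose_mul_succ_eq (c + 1).toNat i.toNat
        have keyZ : ((c + 1).toNat.choose i.toNat : Int) * (((c + 1).toNat : Int) + 1)
            = (((c + 1).toNat + 1).choose i.toNat : Int) * ((((c + 1).toNat + 1 - i.toNat : Nat)) : Int) := by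
          exact_mod_cast congrArg (Nat.cast : Nat → Int) key
        have h2 : (c + 2).toNat = (c + 1).toNat + 1 := by omega
        have hsub : ((((c + 1).toNat + 1 - i.toNat : Nat)) : Int) = c + 2 - i := by omega
        have hc1 : (((c + 1).toNat : Nat) : Int) = c + 1 := by omega
        rw [pyComb_eq, pyComb_eq, PySem.Int.floordiv_eq_iff_of_pos hpos, h2]
        have E : (((c + 1).toNat + 1).choose i.toNat : Int) * (c + 2 - i)
            = ((c + 1).toNat.choose i.toNat : Int) * (c + 2) := by
          rw [← hsub, ← keyZ, hc1]; ring
        constructor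
        · exact le_of_eq E
        · nlinarith [E, hpos]
      rw [hrec]
      obtain ⟨⟨a1, a2, a3, a4⟩, b2⟩ := ih (c + 1) (by omega) ht
      have hadd : c + 1 + 1 = c + 2 := by ring
      rw [hadd] at a1 a2 a3 a4 b2
      refine ⟨⟨by omega, by push_cast at a2 ⊢; omega, a3, ?_⟩, b2⟩
      rcases a4 with h4 | h4
      · left; rw [h4]; push_cast; ring
      · right; exact h4
    · simp only [ht, if_neg, not_false_iff]
      refine ⟨⟨le_refl _, by omega, hcr, Or.inr (by omega)⟩, by simp⟩

-- per-iteration agreement of A's binary search with B's greedy scan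
theorem step_eq (i rank n : Int) (hi1 : 1 ≤ i) (hr : 0 ≤ rank) :
    bsearchA i rank (i - 1) (n - 1) = (scanB i rank (i - 1) 0 1 (n - i).toNat).1 ∧
    pyComb (bsearchA i rank (i - 1) (n - 1)) i = (scanB i rank (i - 1) 0 1 (n - i).toNat).2 ∧
    pyComb (bsearchA i rank (i - 1) (n - 1)) i ≤ rank := by
  have h0 : pyComb (i - 1) i = 0 := pyComb_below i hi1
  have h1 : pyComb (i - 1 + 1) i = 1 := by
    have : i - 1 + 1 = i := by ring
    rw [this]; exact pyComb_self i (by omega)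
  have hscan := scanB_spec i rank hi1 (n - i).toNat (i - 1) (le_refl _) (by omega)
  rw [h0, h1] at hscan
  obtain ⟨hsHit, hsSnd⟩ := hscan
  by_cases hn : i ≤ n
  · have htop : i - 1 + ((n - i).toNat : Int) = n - 1 := by omega
    rw [htop] at hsHit
    have hbHit := bsearchA_isHit i rank (n - 1 - (i - 1)).toNat (i - 1) (n - 1) rfl (by omega) (by omega)
    have heq := isHit_unique hbHit hsHit
    exact ⟨heq, by rw [heq, hsSnd], le_trans (le_of_eq (by rw [heq])) hsHit.2.2.1⟩
  · have hsteps : (n - i).toNat = 0 := by omega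
    rw [hsteps]
    have hbs : bsearchA i rank (i - 1) (n - 1) = i - 1 := by
      rw [bsearchA]; simp only [show ¬ (i - 1 < n - 1) by omega, dif_neg, not_false_iff]
    rw [hbs, scanB]
    exact ⟨rfl, by rw [h0], by omega⟩

theorem loop_eq : ∀ fuel : Nat, ∀ n rank : Int, 0 ≤ rank → ∀ acc : List Int,
    (loopA fuel n rank acc).reverse = loopB fuel n rank acc.reverse := by
  intro fuel
  induction fuel with
  | zero => intro n rank _ acc; rw [loopA, loopB]
  | succ m ih =>
    intro n rank hr acc
    rw [loopA, loopB]
    obtain ⟨e1, e2, e3⟩ := step_eq ((m : Int) + 1) rank n (by omega) hr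
    rw [← e1, ← e2, ih _ _ (by omega), List.reverse_append, List.reverse_cons, List.reverse_nil,
      List.nil_append, List.singleton_append]

-- ===== VERDICT (by name: the statement is the Claim_ definition above) =====
theorem unrank_comb_py_spec : Claim_equal_unrank_comb_py := by
  intro n k rank _ hpre
  obtain ⟨h1, h2, h3, h4⟩ := hpre
  unfold Spec_unrank_comb_py unrank_comb_py unrank_comb_py_alt
  simp only [show ¬ ¬ (0 ≤ k ∧ k ≤ n) by tauto, if_neg, not_false_iff,
    show ¬ ¬ (0 ≤ rank ∧ rank < pyComb n k) by tauto]
  have := loop_eq k.toNat n rank h3 []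
  simpa using this
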